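-- pv_equiv track=rewrite | github.com/a42228a42228/espnet | espnet2/text/phoneme_tokenizer.py | _replace_continuous_pattern
-- ===== SOURCE A (Python) =====
-- from typing import Iterable, List, Optional, Union
--
-- def _replace_continuous_pattern(input_list: List[str], special_symbols: List[str]) -> List[str]:
--     """
--     Replace continuous patterns ['_', 'i', ']', 'i', '_'] or ['_', 'i', ']', 'i', '_', 'i', ']', 'i', '_']
--     with symbols from the provided `special_symbols` list in sequence.
--
--     Args:
--         input_list (List[str]): The input list of phonemes and symbols.
--         special_symbols (List[str]): A list of special symbols to insert in sequence.
--
--     Returns: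
--         List[str]: The modified list with replacements applied.
--     """
--     short_pattern = ['_', 'i', ']', 'i', '_']
--     long_pattern = ['_', 'i', ']', 'i', '_', 'i', ']', 'i', '_']
--     output_list = []
--     i = 0
--     symbol_index = 0  # Index to track the current symbol in special_symbols
--
--     while i < len(input_list):
--         if input_list[i:i+len(long_pattern)] == long_pattern:
--             # Insert two symbols for the long pattern
--             output_list.append(special_symbols[symbol_index % len(special_symbols)])
--             symbol_index += 1
--             output_list.append(special_symbols[symbol_index % len(special_symbols)])
--             symbol_index += 1
--             i += len(long_pattern)
--         elif input_list[i:i+len(short_pattern)] == short_pattern: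
--             # Insert one symbol for the short pattern
--             output_list.append(special_symbols[symbol_index % len(special_symbols)])
--             symbol_index += 1
--             i += len(short_pattern)
--         else:
--             output_list.append(input_list[i])
--             i += 1
--
--     return output_list
-- ===== SOURCE B (Python) =====
-- from typing import List
--
-- def _replace_continuous_pattern(input_list: List[str], special_symbols: List[str]) -> List[str]:
--     # Two staged passes: (1) a find-based greedy tokenizer splits the input into
--     # literal phonemes and marker counts (1 or 2 symbols per match; the long
--     # pattern is the earliest short match extended by an overlapping one);
--     # (2) a second pass assigns rotating special symbols to the markers.
--     SHORT = ['_', 'i', ']', 'i', '_']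
--
--     def find_short(seq):
--         for j in range(len(seq) - 4):
--             if seq[j:j+5] == SHORT:
--                 return j
--         return None
--
--     pieces = []
--     rest = input_list
--     while True:
--         j = find_short(rest)
--         if j is None:
--             pieces.extend(rest)
--             break
--         pieces.extend(rest[:j])
--         if rest[j+4:j+9] == SHORT:
--             pieces.append(2)
--             rest = rest[j+9:]
--         else:
--             pieces.append(1)
--             rest = rest[j+5:]
--
--     out = []
--     k = 0
--     for p in pieces:
--         if isinstance(p, int):
--             for _ in range(p):
--                 out.append(special_symbols[k % len(special_symbols)])
--                 k += 1
--         else: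
--             out.append(p)
--     return out
-- ===== Notes on version B (the rewrite author's own statement) =====
-- stated objective: alternative
-- what changed: B is a two-stage pipeline: a find-first-occurrence greedy tokenizer produces an intermediate list of literal phonemes and marker counts, then a separate pass assigns the rotating special symbols to the markers, instead of A's single while loop that tests both patterns at every index and appends symbols in place.
import Mathlib
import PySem

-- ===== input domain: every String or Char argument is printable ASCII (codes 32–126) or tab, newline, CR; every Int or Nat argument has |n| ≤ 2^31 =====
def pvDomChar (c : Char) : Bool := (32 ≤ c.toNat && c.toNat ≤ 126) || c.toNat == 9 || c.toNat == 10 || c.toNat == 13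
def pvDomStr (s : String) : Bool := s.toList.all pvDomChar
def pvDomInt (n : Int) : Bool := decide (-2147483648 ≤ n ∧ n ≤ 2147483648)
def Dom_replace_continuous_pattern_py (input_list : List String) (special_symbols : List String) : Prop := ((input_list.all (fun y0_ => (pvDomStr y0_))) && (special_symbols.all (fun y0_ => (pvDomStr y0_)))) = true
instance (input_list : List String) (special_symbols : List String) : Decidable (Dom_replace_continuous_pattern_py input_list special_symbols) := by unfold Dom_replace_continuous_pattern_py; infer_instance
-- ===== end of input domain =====

-- B replaces A's per-index while loop by a two-stage pipeline: a find-based greedy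
-- tokenizer into literals and marker counts, then a pass assigning rotating symbols.

-- ===== PORT A =====
-- special_symbols[symbol_index % len(special_symbols)]; on special_symbols = [] Python's
-- '%' raises ZeroDivisionError — those inputs are excluded by Pre_ below, here getD "".
def pvSym (ss : List String) (k : Nat) : String := ss.getD (k % ss.length) ""

def pvShort : List String := ["_", "i", "]", "i", "_"]
def pvLong : List String := ["_", "i", "]", "i", "_", "i", "]", "i", "_"]

-- A's while loop on index i, recast as structural recursion on the unread suffix
def pvGoA (ss : List String) (rest : List String) (k : Nat) : List String :=
  match rest with
  | [] => []
  | x :: xs =>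
    if (x :: xs).take 9 = pvLong then
      pvSym ss k :: pvSym ss (k + 1) :: pvGoA ss ((x :: xs).drop 9) (k + 2)
    else if (x :: xs).take 5 = pvShort then
      pvSym ss k :: pvGoA ss ((x :: xs).drop 5) (k + 1)
    else
      x :: pvGoA ss xs k
  termination_by rest.length
  decreasing_by all_goals (simp; try omega)

def replace_continuous_pattern_py (input_list : List String) (special_symbols : List String) : List String :=
  pvGoA special_symbols input_list 0

-- ===== PORT B =====
-- find_short: index of the first occurrence of the short pattern (None if absent)
def pvFindShort (l : List String) : Option Nat :=
  match l with
  | [] => none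
  | x :: xs =>
    if (x :: xs).take 5 = pvShort then some 0
    else (pvFindShort xs).map (· + 1)

theorem pvFindShort_le {l : List String} {j : Nat} (h : pvFindShort l = some j) :
    j + 5 ≤ l.length := by
  induction l generalizing j with
  | nil => simp [pvFindShort] at h
  | cons x xs ih =>
    rw [pvFindShort] at h
    split at h
    · rename_i ht
      cases h
      have : (x :: xs).length ≥ 5 := by
        have := congrArg List.length ht
        simp [pvShort] at this
        simp
        omega
      omega
    · rcases Option.map_eq_some_iff.mp h with ⟨j', hj', rfl⟩
      have := ih hj'
      simp; omega

-- pass 1: greedy parse into literal strings (inl) and marker counts (inr)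
def pvParse (rest : List String) : List (String ⊕ Nat) :=
  match h : pvFindShort rest with
  | none => rest.map Sum.inl
  | some j =>
    if (rest.drop (j + 4)).take 5 = pvShort then
      (rest.take j).map Sum.inl ++ Sum.inr 2 :: pvParse (rest.drop (j + 9))
    else
      (rest.take j).map Sum.inl ++ Sum.inr 1 :: pvParse (rest.drop (j + 5))
  termination_by rest.length
  decreasing_by
    · have := pvFindShort_le h; simp; omega
    · have := pvFindShort_le h; simp; omega

-- pass 2: assign rotating symbols to the markers
def pvEmit (ss : List String) (pieces : List (String ⊕ Nat)) (k : Nat) : List String :=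
  match pieces with
  | [] => []
  | Sum.inl s :: t => s :: pvEmit ss t k
  | Sum.inr m :: t => (List.range m).map (fun d => pvSym ss (k + d)) ++ pvEmit ss t (k + m)

def replace_continuous_pattern_py_alt (input_list : List String) (special_symbols : List String) : List String :=
  pvEmit special_symbols (pvParse input_list) 0

-- ===== PRECONDITION & SPEC =====
-- Pre_ excludes exactly the inputs on which both Pythons raise ZeroDivisionError:
-- special_symbols empty while the short pattern occurs in input_list.
def Pre_replace_continuous_pattern_py (input_list : List String) (special_symbols : List String) : Prop :=
  special_symbols ≠ [] ∨ ¬ (["_", "i", "]", "i", "_"] <:+: input_list)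
instance (input_list : List String) (special_symbols : List String) : Decidable (Pre_replace_continuous_pattern_py input_list special_symbols) := by unfold Pre_replace_continuous_pattern_py; infer_instance

def pvWitness_replace_continuous_pattern_py : List String × List String :=
  (["a", "_", "i", "]", "i", "_", "b"], ["S1", "S2"])

def Spec_replace_continuous_pattern_py (input_list : List String) (special_symbols : List String) (out : List String) : Prop := out = replace_continuous_pattern_py_alt input_list special_symbols
instance (input_list : List String) (special_symbols : List String) (out : List String) : Decidable (Spec_replace_continuous_pattern_py input_list special_symbols out) := by unfold Spec_replace_continuous_pattern_py; infer_instance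

-- ===== CLAIM =====
def Claim_equal_replace_continuous_pattern_py : Prop := ∀ (input_list : List String) (special_symbols : List String), Dom_replace_continuous_pattern_py input_list special_symbols → Pre_replace_continuous_pattern_py input_list special_symbols → Spec_replace_continuous_pattern_py input_list special_symbols (replace_continuous_pattern_py input_list special_symbols)

-- ===== LEMMAS AND PROOFS =====
-- the long pattern is exactly a short pattern whose 4-shifted window is again short
theorem pv_long_iff (l : List String) :
    l.take 9 = pvLong ↔ (l.take 5 = pvShort ∧ (l.drop 4).take 5 = pvShort) := by
  rcases l with _ | ⟨a, _ | ⟨b, _ | ⟨c, _ | ⟨d, _ | ⟨e, _ | ⟨f, _ | ⟨g, _ | ⟨h, _ | ⟨i, t⟩⟩⟩⟩⟩⟩⟩⟩⟩ <;>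
    · simp [pvLong, pvShort, List.take, List.drop]; try aesop

-- where find_short sees nothing, A's loop copies everything verbatim
theorem pvGoA_of_find_none (ss : List String) {l : List String}
    (h : pvFindShort l = none) (k : Nat) : pvGoA ss l k = l := by
  induction l generalizing k with
  | nil => simp [pvGoA]
  | cons x xs ih =>
    rw [pvFindShort] at h
    split at h
    · exact absurd h (by simp)
    · rename_i hs
      have hl : ¬ ((x :: xs).take 9 = pvLong) := fun hl => hs ((pv_long_iff _).mp hl).1
      rw [pvGoA, if_neg hl, if_neg hs, ih (Option.map_eq_none_iff.mp h)]

-- up to the first match position, A's loop copies verbatim; there the short pattern matches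
theorem pvGoA_skip (ss : List String) {l : List String} {j : Nat}
    (h : pvFindShort l = some j) (k : Nat) :
    pvGoA ss l k = l.take j ++ pvGoA ss (l.drop j) k ∧ (l.drop j).take 5 = pvShort := by
  induction l generalizing j k with
  | nil => simp [pvFindShort] at h
  | cons x xs ih =>
    rw [pvFindShort] at h
    split at h
    · rename_i hs
      cases h
      simpa using hs
    · rename_i hs
      rcases Option.map_eq_some_iff.mp h with ⟨j', hj', rfl⟩
      have hl : ¬ ((x :: xs).take 9 = pvLong) := fun hl => hs ((pv_long_iff _).mp hl).1
      obtain ⟨h1, h2⟩ := ih hj' k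
      refine ⟨?_, by simpa using h2⟩
      rw [pvGoA, if_neg hl, if_neg hs, h1]
      simp

theorem pvEmit_inl_append (ss : List String) (xs : List String)
    (t : List (String ⊕ Nat)) (k : Nat) :
    pvEmit ss (xs.map Sum.inl ++ t) k = xs ++ pvEmit ss t k := by
  induction xs with
  | nil => simp
  | cons x xs ih => simp [pvEmit, ih]

theorem pvEmit_inl (ss : List String) (xs : List String) (k : Nat) :
    pvEmit ss (xs.map Sum.inl) k = xs := by
  have := pvEmit_inl_append ss xs [] k
  simpa [pvEmit] using this

theorem pvGoA_eq_emit_parse (ss : List String) (l : List String) :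
    ∀ k, pvGoA ss l k = pvEmit ss (pvParse l) k := by
  induction l using pvParse.induct with
  | case1 l h =>
    intro k
    rw [pvParse, h, pvGoA_of_find_none ss h, pvEmit_inl]
  | case2 l j h hc ih =>
    intro k
    obtain ⟨h1, h2⟩ := pvGoA_skip ss h k
    rw [pvParse, h]; dsimp only; rw [if_pos hc]
    have hdd : (l.drop j).drop 4 = l.drop (j + 4) := by
      rw [List.drop_drop]
    have hlong : (l.drop j).take 9 = pvLong := (pv_long_iff _).mpr ⟨h2, by rw [hdd]; exact hc⟩
    have hne : l.drop j ≠ [] := by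
      intro he; rw [he] at h2; simp [pvShort] at h2
    obtain ⟨x, xs, hx⟩ := List.exists_cons_of_ne_nil hne
    rw [h1, hx]
    rw [pvGoA, if_pos (hx ▸ hlong)]
    have hd9 : (x :: xs).drop 9 = l.drop (j + 9) := by
      rw [← hx, List.drop_drop]
    rw [hd9, pvEmit_inl_append, pvEmit]
    simp [List.range_succ, ih]
  | case3 l j h hc ih =>
    intro k
    obtain ⟨h1, h2⟩ := pvGoA_skip ss h k
    rw [pvParse, h]; dsimp only; rw [if_neg hc]
    have hlong : ¬ ((l.drop j).take 9 = pvLong) := by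
      intro hl
      have := ((pv_long_iff _).mp hl).2
      rw [List.drop_drop] at this
      exact hc this
    have hne : l.drop j ≠ [] := by
      intro he; rw [he] at h2; simp [pvShort] at h2
    obtain ⟨x, xs, hx⟩ := List.exists_cons_of_ne_nil hne
    rw [h1, hx]
    rw [pvGoA, if_neg (hx ▸ hlong), if_pos (hx ▸ h2)]
    have hd5 : (x :: xs).drop 5 = l.drop (j + 5) := by
      rw [← hx, List.drop_drop]
    rw [hd5, pvEmit_inl_append, pvEmit]
    simp [List.range_succ, ih]

-- ===== VERDICT =====
theorem replace_continuous_pattern_py_spec : Claim_equal_replace_continuous_pattern_py := by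
  intro input_list special_symbols _ _
  unfold Spec_replace_continuous_pattern_py replace_continuous_pattern_py replace_continuous_pattern_py_alt
  exact pvGoA_eq_emit_parse _ _ _
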